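-- pv_equiv track=rewrite | github.com/vchub/daily-python | problems/test_imports.py | make_fr
-- ===== SOURCE A (Python) =====
-- def make_fr(history):
--     fr = {}
--
--     for i in range(len(history) - 1):
--         cur = history[i]
--         nxt = history[i + 1]
--
--         if cur not in fr:
--             fr[cur] = {}
--
--         if nxt in fr[cur]:
--             fr[cur][nxt] += 1
--         else:
--             fr[cur][nxt] = 1
--
--     return fr
-- ===== SOURCE B (Python) =====
-- def make_fr(history):
--     # pass 1: flat count of adjacent pairs
--     cnt = {}
--     for pair in zip(history, history[1:]):
--         cnt[pair] = cnt.get(pair, 0) + 1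
--     # pass 2: reshape the flat table into the nested dict
--     fr = {}
--     for (cur, nxt), k in cnt.items():
--         fr.setdefault(cur, {})[nxt] = k
--     return fr
-- ===== Notes on version B (the rewrite author's own statement) =====
-- stated objective: alternative
-- what changed: Instead of incrementing a nested dict in place while scanning indices, B first builds one flat pair-count table over zip(history, history[1:]) and then reshapes that flat table into the nested dict in a second pass.
import Mathlib
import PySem

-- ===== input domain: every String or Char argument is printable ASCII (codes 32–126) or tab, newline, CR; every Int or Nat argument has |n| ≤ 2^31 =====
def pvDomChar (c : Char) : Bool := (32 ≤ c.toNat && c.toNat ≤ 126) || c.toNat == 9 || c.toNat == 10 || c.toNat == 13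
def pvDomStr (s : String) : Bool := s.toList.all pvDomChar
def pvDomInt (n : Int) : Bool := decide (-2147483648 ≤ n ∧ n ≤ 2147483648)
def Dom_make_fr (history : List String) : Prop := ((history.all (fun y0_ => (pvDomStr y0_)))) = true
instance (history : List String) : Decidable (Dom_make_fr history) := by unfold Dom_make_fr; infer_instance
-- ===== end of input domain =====

-- B replaces A's in-place nested-dict increments by two passes: a flat adjacent-pair count table, then a reshape into the nested dict (alternative decomposition, same cost).


-- ===== PORT A =====
def make_fr (history : List String) : List (String × List (String × Int)) :=
  let fr : PySem.Dict String (PySem.Dict String Int) :=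
    (PySem.List.pyRange 0 (PySem.List.len history - 1) 1).foldl
      (fun fr i =>
        let cur := PySem.List.pyGetD history i ""
        let nxt := PySem.List.pyGetD history (i + 1) ""
        let fr := if fr.contains cur then fr else fr.insert cur PySem.Dict.empty
        let inner := fr.getD cur PySem.Dict.empty
        if inner.contains nxt then
          fr.insert cur (inner.insert nxt (inner.getD nxt 0 + 1))
        else
          fr.insert cur (inner.insert nxt 1))
      PySem.Dict.empty
  fr.items.map (fun p => (p.1, p.2.items))

-- ===== PORT B =====
def make_fr_alt (history : List String) : List (String × List (String × Int)) :=
  -- pass 1: flat count of adjacent pairs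
  let cnt : PySem.Dict (String × String) Int :=
    (history.zip (PySem.List.slice history (some 1) none)).foldl
      (fun d pair => d.insert pair (d.getD pair 0 + 1)) PySem.Dict.empty
  -- pass 2: reshape the flat table into the nested dict
  let fr : PySem.Dict String (PySem.Dict String Int) :=
    cnt.items.foldl
      (fun fr q =>
        let fr := fr.setdefault q.1.1 PySem.Dict.empty
        fr.insert q.1.1 ((fr.getD q.1.1 PySem.Dict.empty).insert q.1.2 q.2))
      PySem.Dict.empty
  fr.items.map (fun p => (p.1, p.2.items))

-- ===== PRECONDITION & SPEC =====
def Spec_make_fr (history : List String) (out : List (String × List (String × Int))) : Prop := out = make_fr_alt history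
instance (history : List String) (out : List (String × List (String × Int))) : Decidable (Spec_make_fr history out) := by unfold Spec_make_fr; infer_instance

-- ===== CLAIM (what is proved, stated in full; the proofs are below) =====
def Claim_equal_make_fr : Prop := ∀ (history : List String), Dom_make_fr history → Spec_make_fr history (make_fr history)

-- ===== LEMMAS AND PROOFS =====

def innerF (ps : List (String × String)) (c : String) : PySem.Dict String Int :=
  PySem.Dict.mk ((PySem.Set.ofList ((ps.filter (fun q => q.1 == c)).map Prod.snd)).map
    (fun n => (n, (ps.count (c, n) : Int))))

def nestF (ps : List (String × String)) : PySem.Dict String (PySem.Dict String Int) :=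
  PySem.Dict.mk ((PySem.Set.ofList (ps.map Prod.fst)).map (fun c => (c, innerF ps c)))

theorem keys_nestF (ps : List (String × String)) :
    (nestF ps).keys = PySem.Set.ofList (ps.map Prod.fst) := by
  simp only [nestF, PySem.Dict.keys_mk, List.map_map]
  exact List.map_id _

theorem nodup_keys_nestF (ps : List (String × String)) : (nestF ps).keys.Nodup := by
  rw [keys_nestF]; exact PySem.Set.nodup_ofList _

theorem contains_nestF (ps : List (String × String)) (c : String) :
    (nestF ps).contains c = true ↔ c ∈ ps.map Prod.fst := by
  rw [PySem.Dict.contains_iff_mem_keys, keys_nestF, PySem.Set.mem_ofList]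

theorem getD_nestF (ps : List (String × String)) {c : String} (h : c ∈ ps.map Prod.fst) (d0 : PySem.Dict String Int) :
    (nestF ps).getD c d0 = innerF ps c := by
  apply PySem.Dict.getD_of_mem_items _ _ (nodup_keys_nestF ps)
  show (c, innerF ps c) ∈ (nestF ps).items
  simp only [nestF]
  exact List.mem_map_of_mem ((PySem.Set.mem_ofList _ _).2 h)

theorem keys_innerF (ps : List (String × String)) (c : String) :
    (innerF ps c).keys = PySem.Set.ofList ((ps.filter (fun q => q.1 == c)).map Prod.snd) := by
  simp only [innerF, PySem.Dict.keys_mk, List.map_map]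
  exact List.map_id _

theorem nodup_keys_innerF (ps : List (String × String)) (c : String) : (innerF ps c).keys.Nodup := by
  rw [keys_innerF]; exact PySem.Set.nodup_ofList _

theorem contains_innerF (ps : List (String × String)) (c n : String) :
    (innerF ps c).contains n = true ↔ n ∈ (ps.filter (fun q => q.1 == c)).map Prod.snd := by
  rw [PySem.Dict.contains_iff_mem_keys, keys_innerF, PySem.Set.mem_ofList]

theorem getD_innerF (ps : List (String × String)) {c n : String}
    (h : n ∈ (ps.filter (fun q => q.1 == c)).map Prod.snd) (d0 : Int) :
    (innerF ps c).getD n d0 = (ps.count (c, n) : Int) := by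
  apply PySem.Dict.getD_of_mem_items _ _ (nodup_keys_innerF ps c)
  show (n, (ps.count (c, n) : Int)) ∈ (innerF ps c).items
  simp only [innerF]
  exact List.mem_map_of_mem ((PySem.Set.mem_ofList _ _).2 h)

theorem filter_append_ne (ps : List (String × String)) {c c' : String} (n : String) (h : c' ≠ c) :
    (ps ++ [(c, n)]).filter (fun q => q.1 == c') = ps.filter (fun q => q.1 == c') := by
  simp [List.filter_append, h.symm]

theorem count_append_ne (ps : List (String × String)) {c c' : String} (n n' : String) (h : (c', n') ≠ (c, n)) :
    (ps ++ [(c, n)]).count (c', n') = ps.count (c', n') := by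
  have : ((c, n) == (c', n')) = false := by
    simp only [beq_eq_false_iff_ne]
    exact fun e => h e.symm
  simp [List.count_append, List.count_singleton, this]

theorem innerF_append_ne (ps : List (String × String)) {c c' : String} (n : String) (h : c' ≠ c) :
    innerF (ps ++ [(c, n)]) c' = innerF ps c' := by
  unfold innerF
  rw [filter_append_ne ps n h]
  congr 1
  apply List.map_congr_left
  intro n' _
  rw [count_append_ne ps n n' (by simp [h])]

theorem filter_nil_of_not_mem (ps : List (String × String)) {c : String} (h : c ∉ ps.map Prod.fst) :
    ps.filter (fun q => q.1 == c) = [] := by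
  rw [List.filter_eq_nil_iff]
  intro q hq hbeq
  apply h
  have : q.1 = c := by simpa using hbeq
  exact this ▸ List.mem_map_of_mem (f := Prod.fst) hq

theorem count_zero_of_not_mem_fst (ps : List (String × String)) {c : String} (n : String) (h : c ∉ ps.map Prod.fst) :
    ps.count (c, n) = 0 := by
  rw [List.count_eq_zero]
  intro hmem
  exact h (by simpa using List.mem_map_of_mem (f := Prod.fst) hmem)

theorem count_zero_of_not_mem_snd (ps : List (String × String)) {c n : String}
    (h : n ∉ (ps.filter (fun q => q.1 == c)).map Prod.snd) :
    ps.count (c, n) = 0 := by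
  rw [List.count_eq_zero]
  intro hmem
  apply h
  have : (c, n) ∈ ps.filter (fun q => q.1 == c) := by
    simp [List.mem_filter, hmem]
  simpa using List.mem_map_of_mem (f := Prod.snd) this

def AStep (fr : PySem.Dict String (PySem.Dict String Int)) (p : String × String) :
    PySem.Dict String (PySem.Dict String Int) :=
  let fr1 := if fr.contains p.1 then fr else fr.insert p.1 PySem.Dict.empty
  let inner := fr1.getD p.1 PySem.Dict.empty
  if inner.contains p.2 then fr1.insert p.1 (inner.insert p.2 (inner.getD p.2 0 + 1))
  else fr1.insert p.1 (inner.insert p.2 1)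

theorem inner_fresh (ps : List (String × String)) (c n : String) (hc : ps.filter (fun q => q.1 == c) = [])
    (hcnt : ps.count (c, n) = 0) :
    PySem.Dict.empty.insert n 1 = innerF (ps ++ [(c, n)]) c := by
  unfold innerF
  rw [List.filter_append, hc]
  simp only [List.filter_cons, beq_self_eq_true, if_true, List.filter_nil, List.nil_append,
    List.map_cons, List.map_nil]
  have hone : (((ps ++ [(c, n)]).count (c, n) : Nat) : Int) = 1 := by
    rw [List.count_append, hcnt]; simp
  apply PySem.Dict.ext
  rw [PySem.Dict.items_insert_of_not_contains _ _ (by simp [PySem.Dict.contains_empty])]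
  rw [show PySem.Set.ofList [n] = [n] from rfl]
  simp only [List.map_cons, List.map_nil, hone]
  rfl

theorem inner_bump (ps : List (String × String)) (c n : String)
    (hn : n ∈ (ps.filter (fun q => q.1 == c)).map Prod.snd) :
    (innerF ps c).insert n ((ps.count (c, n) : Int) + 1) = innerF (ps ++ [(c, n)]) c := by
  have hT : n ∈ PySem.Set.ofList ((ps.filter (fun q => q.1 == c)).map Prod.snd) :=
    (PySem.Set.mem_ofList _ _).2 hn
  apply PySem.Dict.ext
  rw [PySem.Dict.items_insert_of_contains _ _ ((contains_innerF ps c n).2 hn)]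
  show ((PySem.Set.ofList ((ps.filter (fun q => q.1 == c)).map Prod.snd)).map
      (fun n' => (n', (ps.count (c, n') : Int)))).map _ = _
  unfold innerF
  rw [List.filter_append]
  simp only [List.filter_cons, beq_self_eq_true, if_true, List.filter_nil, List.map_append,
    List.map_cons, List.map_nil]
  rw [PySem.Set.ofList_append_singleton, PySem.Set.add_of_mem hT, List.map_map]
  apply List.map_congr_left
  intro n' _
  simp only [Function.comp]
  by_cases he : n' = n
  · subst he
    simp [List.count_append]
  · have : (n' == n) = false := beq_eq_false_iff_ne.2 he
    simp only [this, Bool.false_eq_true, if_false]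
    rw [count_append_ne ps n n' (by simp [Prod.ext_iff, he])]

theorem inner_new (ps : List (String × String)) (c n : String)
    (hn : n ∉ (ps.filter (fun q => q.1 == c)).map Prod.snd) :
    (innerF ps c).insert n 1 = innerF (ps ++ [(c, n)]) c := by
  have hT : n ∉ PySem.Set.ofList ((ps.filter (fun q => q.1 == c)).map Prod.snd) :=
    fun h => hn ((PySem.Set.mem_ofList _ _).1 h)
  apply PySem.Dict.ext
  rw [PySem.Dict.items_insert_of_not_contains _ _ (by rw [← Bool.not_eq_true, contains_innerF]; exact hn)]
  show ((PySem.Set.ofList ((ps.filter (fun q => q.1 == c)).map Prod.snd)).map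
      (fun n' => (n', (ps.count (c, n') : Int)))) ++ [(n, 1)] = _
  unfold innerF
  rw [List.filter_append]
  simp only [List.filter_cons, beq_self_eq_true, if_true, List.filter_nil, List.map_append,
    List.map_cons, List.map_nil]
  rw [PySem.Set.ofList_append_singleton, PySem.Set.add_of_not_mem hT, List.map_append]
  congr 1
  · apply List.map_congr_left
    intro n' hn'
    have he : n' ≠ n := fun h => hT (h ▸ hn')
    rw [count_append_ne ps n n' (by simp [Prod.ext_iff, he])]
  · simp only [List.map_cons, List.map_nil]
    rw [List.count_append, count_zero_of_not_mem_snd ps hn]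
    simp

theorem outer_mem (ps : List (String × String)) (c n : String) (inner' : PySem.Dict String Int)
    (hc : c ∈ ps.map Prod.fst) (hin : inner' = innerF (ps ++ [(c, n)]) c) :
    (nestF ps).insert c inner' = nestF (ps ++ [(c, n)]) := by
  have hcS : c ∈ PySem.Set.ofList (ps.map Prod.fst) := (PySem.Set.mem_ofList _ _).2 hc
  apply PySem.Dict.ext
  rw [PySem.Dict.items_insert_of_contains _ _ ((contains_nestF ps c).2 hc)]
  show ((PySem.Set.ofList (ps.map Prod.fst)).map (fun c' => (c', innerF ps c'))).map _ = _
  unfold nestF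
  simp only [List.map_append, List.map_cons, List.map_nil]
  rw [PySem.Set.ofList_append_singleton, PySem.Set.add_of_mem hcS, List.map_map]
  apply List.map_congr_left
  intro c' _
  simp only [Function.comp]
  by_cases he : c' = c
  · subst he
    simp [hin]
  · have : (c' == c) = false := beq_eq_false_iff_ne.2 he
    simp only [this, Bool.false_eq_true, if_false]
    rw [innerF_append_ne ps n he]

theorem outer_fresh (ps : List (String × String)) (c n : String) (inner' : PySem.Dict String Int)
    (hc : c ∉ ps.map Prod.fst) (hin : inner' = innerF (ps ++ [(c, n)]) c) :
    ((nestF ps).insert c PySem.Dict.empty).insert c inner' = nestF (ps ++ [(c, n)]) := by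
  have hcS : c ∉ PySem.Set.ofList (ps.map Prod.fst) := fun h => hc ((PySem.Set.mem_ofList _ _).1 h)
  have hcon : (nestF ps).contains c = false := by
    rw [← Bool.not_eq_true, contains_nestF]; exact hc
  apply PySem.Dict.ext
  rw [PySem.Dict.items_insert_of_contains _ _ (by rw [PySem.Dict.contains_insert]; simp)]
  rw [PySem.Dict.items_insert_of_not_contains _ _ hcon]
  show (((PySem.Set.ofList (ps.map Prod.fst)).map (fun c' => (c', innerF ps c'))) ++ [(c, PySem.Dict.empty)]).map _ = _
  unfold nestF
  simp only [List.map_append, List.map_cons, List.map_nil]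
  rw [PySem.Set.ofList_append_singleton, PySem.Set.add_of_not_mem hcS, List.map_append, List.map_map]
  congr 1
  · apply List.map_congr_left
    intro c' hc'
    simp only [Function.comp]
    have he : c' ≠ c := fun h => hcS (h ▸ hc')
    have : (c' == c) = false := beq_eq_false_iff_ne.2 he
    simp only [this, Bool.false_eq_true, if_false]
    rw [innerF_append_ne ps n he]
  · simp [hin]

theorem AStep_nestF (ps : List (String × String)) (p : String × String) :
    AStep (nestF ps) p = nestF (ps ++ [p]) := by
  obtain ⟨c, n⟩ := p
  by_cases hc : c ∈ ps.map Prod.fst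
  · have hcon : (nestF ps).contains c = true := (contains_nestF ps c).2 hc
    simp only [AStep, hcon, if_true]
    rw [getD_nestF ps hc]
    by_cases hn : n ∈ (ps.filter (fun q => q.1 == c)).map Prod.snd
    · have hicon : (innerF ps c).contains n = true := (contains_innerF ps c n).2 hn
      simp only [hicon, if_true]
      rw [getD_innerF ps hn]
      exact outer_mem ps c n _ hc (inner_bump ps c n hn)
    · have hicon : (innerF ps c).contains n = false := by
        rw [← Bool.not_eq_true, contains_innerF]; exact hn
      simp only [hicon, Bool.false_eq_true, if_false]
      exact outer_mem ps c n _ hc (inner_new ps c n hn)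
  · have hcon : (nestF ps).contains c = false := by
      rw [← Bool.not_eq_true, contains_nestF]; exact hc
    simp only [AStep, hcon, Bool.false_eq_true, if_false]
    rw [PySem.Dict.getD_insert_self]
    simp only [PySem.Dict.contains_empty, Bool.false_eq_true, if_false]
    exact outer_fresh ps c n _ hc
      (inner_fresh ps c n (filter_nil_of_not_mem ps hc) (count_zero_of_not_mem_fst ps n hc))

def BStep (fr : PySem.Dict String (PySem.Dict String Int)) (q : (String × String) × Int) :
    PySem.Dict String (PySem.Dict String Int) :=
  let fr1 := fr.setdefault q.1.1 PySem.Dict.empty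
  fr1.insert q.1.1 ((fr1.getD q.1.1 PySem.Dict.empty).insert q.1.2 q.2)

def innerB (q : List (String × String)) (v : String × String → Int) (c : String) : PySem.Dict String Int :=
  PySem.Dict.mk ((q.filter (fun r => r.1 == c)).map (fun r => (r.2, v r)))

def nestB (q : List (String × String)) (v : String × String → Int) : PySem.Dict String (PySem.Dict String Int) :=
  PySem.Dict.mk ((PySem.Set.ofList (q.map Prod.fst)).map (fun c => (c, innerB q v c)))

theorem keys_nestB (q : List (String × String)) (v : String × String → Int) :
    (nestB q v).keys = PySem.Set.ofList (q.map Prod.fst) := by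
  simp only [nestB, PySem.Dict.keys_mk, List.map_map]
  exact List.map_id _

theorem contains_nestB (q : List (String × String)) (v : String × String → Int) (c : String) :
    (nestB q v).contains c = true ↔ c ∈ q.map Prod.fst := by
  rw [PySem.Dict.contains_iff_mem_keys, keys_nestB, PySem.Set.mem_ofList]

theorem getD_nestB (q : List (String × String)) (v : String × String → Int) {c : String}
    (h : c ∈ q.map Prod.fst) (d0 : PySem.Dict String Int) :
    (nestB q v).getD c d0 = innerB q v c := by
  apply PySem.Dict.getD_of_mem_items _ _ (by rw [keys_nestB]; exact PySem.Set.nodup_ofList _)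
  show (c, innerB q v c) ∈ (nestB q v).items
  exact List.mem_map_of_mem ((PySem.Set.mem_ofList _ _).2 h)

theorem filterB_append_ne (q : List (String × String)) {a c : String} (b : String) (h : c ≠ a) :
    (q ++ [(a, b)]).filter (fun r => r.1 == c) = q.filter (fun r => r.1 == c) := by
  simp [List.filter_append, h.symm]

theorem innerB_append_ne (q : List (String × String)) (v : String × String → Int) {a c : String}
    (b : String) (h : c ≠ a) : innerB (q ++ [(a, b)]) v c = innerB q v c := by
  unfold innerB; rw [filterB_append_ne q b h]

theorem not_mem_inner_keys (q : List (String × String)) {a b : String} (hp : (a, b) ∉ q) :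
    b ∉ (q.filter (fun r => r.1 == a)).map Prod.snd := by
  intro hmem
  obtain ⟨r, hr, hr2⟩ := List.mem_map.1 hmem
  obtain ⟨hrq, hr1⟩ := List.mem_filter.1 hr
  have : r = (a, b) := Prod.ext (by simpa using hr1) hr2
  exact hp (this ▸ hrq)

theorem LB' (v : String × String → Int) : ∀ (q : List (String × String)), q.Nodup →
    (q.map (fun p => (p, v p))).foldl BStep PySem.Dict.empty = nestB q v := by
  intro q
  induction q using List.reverseRecOn with
  | nil => intro _; rfl
  | append_singleton q p ih =>
    intro hnd
    have hq : q.Nodup := (List.nodup_append.1 hnd).1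
    have hp : p ∉ q := by
      have hd := (List.nodup_append.1 hnd).2.2
      intro hmem
      exact hd p hmem p (List.mem_singleton_self p) rfl
    rw [List.map_append, List.foldl_append, ih hq, List.map_cons, List.map_nil,
      List.foldl_cons, List.foldl_nil]
    obtain ⟨a, b⟩ := p
    by_cases ha : a ∈ q.map Prod.fst
    · have hcon : (nestB q v).contains a = true := (contains_nestB q v a).2 ha
      simp only [BStep, PySem.Dict.setdefault_of_contains _ _ hcon]
      rw [getD_nestB q v ha]
      -- inner: append the fresh key b
      have hbnot : b ∉ (q.filter (fun r => r.1 == a)).map Prod.snd := not_mem_inner_keys q hp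
      have hinner : (innerB q v a).insert b (v (a, b)) = innerB (q ++ [(a, b)]) v a := by
        apply PySem.Dict.ext
        rw [PySem.Dict.items_insert_of_not_contains _ _ (by
          rw [← Bool.not_eq_true, PySem.Dict.contains_iff_mem_keys]
          simp only [innerB, PySem.Dict.keys_mk, List.map_map]
          intro hmem
          exact hbnot (by simpa using hmem))]
        show ((q.filter (fun r => r.1 == a)).map (fun r => (r.2, v r))) ++ [(b, v (a, b))] = _
        unfold innerB
        rw [List.filter_append]
        simp
      -- outer: replace entry at a
      apply PySem.Dict.ext
      rw [PySem.Dict.items_insert_of_contains _ _ hcon]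
      show ((PySem.Set.ofList (q.map Prod.fst)).map (fun c => (c, innerB q v c))).map _ = _
      unfold nestB
      simp only [List.map_append, List.map_cons, List.map_nil]
      rw [PySem.Set.ofList_append_singleton, PySem.Set.add_of_mem ((PySem.Set.mem_ofList _ _).2 ha),
        List.map_map]
      apply List.map_congr_left
      intro c hcS
      simp only [Function.comp]
      by_cases he : c = a
      · subst he; simp [hinner]
      · have : (c == a) = false := beq_eq_false_iff_ne.2 he
        simp only [this, Bool.false_eq_true, if_false]
        rw [innerB_append_ne q v b he]
    · have hcon : (nestB q v).contains a = false := by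
        rw [← Bool.not_eq_true, contains_nestB]; exact ha
      have haS : a ∉ PySem.Set.ofList (q.map Prod.fst) := fun h => ha ((PySem.Set.mem_ofList _ _).1 h)
      simp only [BStep, PySem.Dict.setdefault_of_not_contains _ _ hcon]
      rw [PySem.Dict.getD_insert_self]
      have hfil : q.filter (fun r => r.1 == a) = [] := by
        rw [List.filter_eq_nil_iff]
        intro r hr hbeq
        exact ha ((show r.1 = a by simpa using hbeq) ▸ List.mem_map_of_mem (f := Prod.fst) hr)
      have hinner : PySem.Dict.empty.insert b (v (a, b)) = innerB (q ++ [(a, b)]) v a := by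
        apply PySem.Dict.ext
        rw [PySem.Dict.items_insert_of_not_contains _ _ (by simp [PySem.Dict.contains_empty])]
        unfold innerB
        rw [List.filter_append, hfil]
        simp only [List.filter_cons, beq_self_eq_true, if_true, List.filter_nil, List.nil_append,
          List.map_cons, List.map_nil]
        rfl
      apply PySem.Dict.ext
      rw [PySem.Dict.items_insert_of_contains _ _ (by rw [PySem.Dict.contains_insert]; simp)]
      rw [PySem.Dict.items_insert_of_not_contains _ _ hcon]
      show (((PySem.Set.ofList (q.map Prod.fst)).map (fun c => (c, innerB q v c))) ++ [(a, PySem.Dict.empty)]).map _ = _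
      unfold nestB
      simp only [List.map_append, List.map_cons, List.map_nil]
      rw [PySem.Set.ofList_append_singleton, PySem.Set.add_of_not_mem haS, List.map_append, List.map_map]
      congr 1
      · apply List.map_congr_left
        intro c hcS
        simp only [Function.comp]
        have he : c ≠ a := fun h => haS (h ▸ hcS)
        have : (c == a) = false := beq_eq_false_iff_ne.2 he
        simp only [this, Bool.false_eq_true, if_false]
        rw [innerB_append_ne q v b he]
      · simp [hinner]

theorem G1 (ps : List (String × String)) :
    PySem.Set.ofList ((PySem.Set.ofList ps).map Prod.fst) = PySem.Set.ofList (ps.map Prod.fst) := by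
  induction ps using List.reverseRecOn with
  | nil => rfl
  | append_singleton ps p ih =>
    rw [PySem.Set.ofList_append_singleton, List.map_append, List.map_singleton,
      PySem.Set.ofList_append_singleton, ← ih]
    by_cases hp : p ∈ PySem.Set.ofList ps
    · rw [PySem.Set.add_of_mem hp, PySem.Set.add_of_mem]
      rw [PySem.Set.mem_ofList]
      exact List.mem_map_of_mem hp
    · rw [PySem.Set.add_of_not_mem hp, List.map_append, List.map_singleton,
        PySem.Set.ofList_append_singleton]

theorem G2 (ps : List (String × String)) (c : String) :
    (PySem.Set.ofList ps).filter (fun r => r.1 == c)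
    = ((PySem.Set.ofList ((ps.filter (fun q => q.1 == c)).map Prod.snd)).map (fun n => (c, n))) := by
  induction ps using List.reverseRecOn with
  | nil => rfl
  | append_singleton ps p ih =>
    obtain ⟨a, b⟩ := p
    rw [PySem.Set.ofList_append_singleton, List.filter_append]
    by_cases ha : a = c
    · subst ha
      simp only [List.filter_cons, beq_self_eq_true, if_true, List.filter_nil,
        List.map_append, List.map_cons, List.map_nil, PySem.Set.ofList_append_singleton]
      by_cases hp : (a, b) ∈ PySem.Set.ofList ps
      · have hb : b ∈ PySem.Set.ofList ((ps.filter (fun q => q.1 == a)).map Prod.snd) := by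
          rw [PySem.Set.mem_ofList]
          exact List.mem_map.2 ⟨(a, b), List.mem_filter.2 ⟨(PySem.Set.mem_ofList ps _).1 hp, by simp⟩, rfl⟩
        rw [PySem.Set.add_of_mem hp, PySem.Set.add_of_mem hb, ih]
      · have hb : b ∉ PySem.Set.ofList ((ps.filter (fun q => q.1 == a)).map Prod.snd) := by
          rw [PySem.Set.mem_ofList]
          intro hmem
          obtain ⟨r, hr, hr2⟩ := List.mem_map.1 hmem
          obtain ⟨hrps, hr1⟩ := List.mem_filter.1 hr
          have : r = (a, b) := Prod.ext (by simpa using hr1) hr2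
          exact hp ((PySem.Set.mem_ofList ps _).2 (this ▸ hrps))
        rw [PySem.Set.add_of_not_mem hp, PySem.Set.add_of_not_mem hb, List.filter_append, ih,
          List.map_append]
        simp
    · have hbeq : (a == c) = false := beq_eq_false_iff_ne.2 ha
      simp only [List.filter_cons, hbeq, Bool.false_eq_true, if_false, List.filter_nil,
        List.append_nil]
      by_cases hp : (a, b) ∈ PySem.Set.ofList ps
      · rw [PySem.Set.add_of_mem hp, ih]
      · rw [PySem.Set.add_of_not_mem hp, List.filter_append, ih]
        simp [hbeq]

theorem LB (ps : List (String × String)) :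
    ((PySem.Dict.counter ps).items).foldl BStep PySem.Dict.empty = nestF ps := by
  rw [PySem.Dict.items_counter]
  rw [show (fun k => (k, ((List.count k ps : Nat) : Int))) = (fun p => (p, (fun r => ((List.count r ps : Nat) : Int)) p)) from rfl]
  rw [LB' _ _ (PySem.Set.nodup_ofList ps)]
  unfold nestB nestF
  rw [G1]
  congr 1
  apply List.map_congr_left
  intro c _
  unfold innerB innerF
  rw [G2, List.map_map]
  rfl

theorem natFold (f : PySem.Dict String (PySem.Dict String Int) → String → String → PySem.Dict String (PySem.Dict String Int)) :
    ∀ (xs : List String) (init),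
    (List.range (xs.length - 1)).foldl (fun acc k => f acc (xs.getD k "") (xs.getD (k+1) "")) init
    = (xs.zip xs.tail).foldl (fun acc p => f acc p.1 p.2) init := by
  intro xs
  induction xs with
  | nil => intro init; simp
  | cons x xs ih =>
    cases xs with
    | nil => intro init; simp
    | cons y rest =>
      intro init
      have hlen : (x :: y :: rest).length - 1 = rest.length + 1 := by simp
      rw [hlen, List.range_succ_eq_map, List.foldl_cons, List.foldl_map]
      simp only [List.getD_cons_zero, List.getD_cons_succ, Nat.succ_eq_add_one]
      have := ih (f init x y)
      simp only [List.length_cons, Nat.add_sub_cancel, List.tail_cons] at this ⊢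
      rw [List.zip_cons_cons, List.foldl_cons]
      exact this

theorem rangeFold (xs : List String) (f : PySem.Dict String (PySem.Dict String Int) → String → String → PySem.Dict String (PySem.Dict String Int)) (init : PySem.Dict String (PySem.Dict String Int)) :
    (PySem.List.pyRange 0 (PySem.List.len xs - 1) 1).foldl
      (fun acc i => f acc (PySem.List.pyGetD xs i "") (PySem.List.pyGetD xs (i + 1) "")) init
    = (xs.zip xs.tail).foldl (fun acc p => f acc p.1 p.2) init := by
  rw [PySem.List.pyRange_one, List.foldl_map, PySem.List.len_eq]
  have hcast : ((xs.length : Int) - 1 - 0).toNat = xs.length - 1 := by omega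
  rw [hcast]
  have hfun : (fun (acc : PySem.Dict String (PySem.Dict String Int)) (k : Nat) =>
      f acc (PySem.List.pyGetD xs ((0:Int) + k) "") (PySem.List.pyGetD xs ((0:Int) + k + 1) ""))
      = fun acc k => f acc (xs.getD k "") (xs.getD (k+1) "") := by
    funext acc k
    have h2 : ((k : Int) + 1) = ((k+1 : Nat) : Int) := by push_cast; ring
    rw [show ((0:Int) + k) = (k : Int) by omega, h2, PySem.List.pyGetD_natCast, PySem.List.pyGetD_natCast]
  rw [hfun, natFold]

theorem LA (ps : List (String × String)) :
    ps.foldl AStep PySem.Dict.empty = nestF ps := by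
  induction ps using List.reverseRecOn with
  | nil => rfl
  | append_singleton ps p ih => rw [List.foldl_append, List.foldl_cons, List.foldl_nil, ih, AStep_nestF]

-- ===== VERDICT (by name: the statement is the Claim_ definition above) =====
theorem make_fr_spec : Claim_equal_make_fr := by
  intro history _
  show make_fr history = make_fr_alt history
  unfold make_fr make_fr_alt
  rw [PySem.List.slice_from_one, PySem.Dict.foldl_insert_getD_add_one_eq_counter]
  have hA := rangeFold history (fun acc c n => AStep acc (c, n)) PySem.Dict.empty
  simp only [] at hA
  rw [show (fun (fr : PySem.Dict String (PySem.Dict String Int)) (i : Int) =>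
        let cur := PySem.List.pyGetD history i ""
        let nxt := PySem.List.pyGetD history (i + 1) ""
        let fr := if fr.contains cur then fr else fr.insert cur PySem.Dict.empty
        let inner := fr.getD cur PySem.Dict.empty
        if inner.contains nxt then
          fr.insert cur (inner.insert nxt (inner.getD nxt 0 + 1))
        else
          fr.insert cur (inner.insert nxt 1))
      = (fun acc i => AStep acc (PySem.List.pyGetD history i "", PySem.List.pyGetD history (i+1) "")) from rfl]
  rw [hA]
  rw [show (fun (acc : PySem.Dict String (PySem.Dict String Int)) (p : String × String) => AStep acc (p.1, p.2)) = AStep from by funext a p; rfl]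
  rw [show (fun (fr : PySem.Dict String (PySem.Dict String Int)) (q : (String × String) × Int) =>
        let fr1 := fr.setdefault q.1.1 PySem.Dict.empty
        fr1.insert q.1.1 ((fr1.getD q.1.1 PySem.Dict.empty).insert q.1.2 q.2)) = BStep from rfl]
  rw [LA]; simp only [LB]
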